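-- pv_equiv track=rewrite | github.com/nbeesetti/grad-gpt | deadlines-agent.py | filter_forms
-- ===== SOURCE A (Python) =====
-- def filter_forms(forms, selected_tags, limit=8):
--     if not selected_tags:
--         return forms[:limit]
--
--     selected_lower = [t.lower() for t in selected_tags]
--     scored = []
--
--     for form in forms:
--         form_tags = [t.lower() for t in form.get("tags", [])]
--         score = sum(1 for t in selected_lower if t in form_tags)
--         if score > 0:
--             scored.append((score, form))
--
--     scored.sort(key=lambda x: x[0], reverse=True)
--     return [form for _, form in scored[:limit]]
-- ===== SOURCE B (Python) =====
-- def filter_forms(forms, selected_tags, limit=8):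
--     if not selected_tags:
--         return forms[:limit]
--
--     selected_lower = [t.lower() for t in selected_tags]
--
--     def score(form):
--         form_tags = [t.lower() for t in form.get("tags", [])]
--         return sum(1 for t in selected_lower if t in form_tags)
--
--     scores = [score(form) for form in forms]
--
--     result = []
--     for s in range(len(selected_lower), 0, -1):
--         for form, sc in zip(forms, scores):
--             if sc == s:
--                 result.append(form)
--     return result[:limit]
-- ===== Notes on version B (the rewrite author's own statement) =====
-- stated objective: alternative
-- what changed: Replaces collect-then-comparison-sort of (score, form) pairs by staged selection passes: scores are precomputed once per form, then for each possible score from len(selected_tags) down to 1 the forms with exactly that score are appended, and the result is sliced to the limit; no sort.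
import Mathlib
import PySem

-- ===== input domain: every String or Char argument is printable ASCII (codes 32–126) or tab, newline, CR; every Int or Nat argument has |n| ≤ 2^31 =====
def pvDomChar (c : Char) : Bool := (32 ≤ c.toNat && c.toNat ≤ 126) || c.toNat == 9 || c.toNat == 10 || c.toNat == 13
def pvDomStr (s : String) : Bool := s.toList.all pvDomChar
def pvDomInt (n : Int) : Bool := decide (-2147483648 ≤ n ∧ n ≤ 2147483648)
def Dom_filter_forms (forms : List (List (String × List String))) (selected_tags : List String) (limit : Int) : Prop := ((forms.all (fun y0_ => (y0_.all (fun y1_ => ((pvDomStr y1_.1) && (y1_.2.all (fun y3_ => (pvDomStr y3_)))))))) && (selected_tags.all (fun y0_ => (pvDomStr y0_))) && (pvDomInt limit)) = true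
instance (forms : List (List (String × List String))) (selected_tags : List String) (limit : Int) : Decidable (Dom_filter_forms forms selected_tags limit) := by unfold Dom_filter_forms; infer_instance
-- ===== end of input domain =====

-- B replaces A's collect-and-sort of (score, form) pairs by staged selection passes: one scan of forms per possible score, from highest to lowest; same return value, no speed claim.

-- ===== PORT A =====
def filter_forms (forms : List (List (String × List String))) (selected_tags : List String) (limit : Int) : List (List (String × List String)) :=
  if selected_tags = [] then PySem.List.slice forms none (some limit)
  else
    let selected_lower := selected_tags.map PySem.Str.lower
    let scored := forms.foldl (fun acc form =>
      let form_tags := ((PySem.Dict.mk form).getD "tags" []).map PySem.Str.lower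
      let score : Int := selected_lower.foldl (fun n t => if t ∈ form_tags then n + 1 else n) 0
      if score > 0 then acc ++ [(score, form)] else acc) []
    let sortedScored := PySem.List.sorted scored (fun x => x.1) true
    (PySem.List.slice sortedScored none (some limit)).map (fun p => p.2)

-- ===== PORT B =====
def filter_forms_alt (forms : List (List (String × List String))) (selected_tags : List String) (limit : Int) : List (List (String × List String)) :=
  if selected_tags = [] then PySem.List.slice forms none (some limit)
  else
    let selected_lower := selected_tags.map PySem.Str.lower
    let score := fun (form : List (String × List String)) =>
      let form_tags := ((PySem.Dict.mk form).getD "tags" []).map PySem.Str.lower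
      selected_lower.foldl (fun (n : Int) t => if t ∈ form_tags then n + 1 else n) 0
    let scores := forms.map score
    let result := (PySem.List.pyRange (PySem.List.len selected_lower) 0 (-1)).foldl
      (fun acc s => (forms.zip scores).foldl (fun acc p =>
        if p.2 = s then acc ++ [p.1] else acc) acc) []
    PySem.List.slice result none (some limit)

-- ===== PRECONDITION & SPEC =====
def Spec_filter_forms (forms : List (List (String × List String))) (selected_tags : List String) (limit : Int) (out : List (List (String × List String))) : Prop := out = filter_forms_alt forms selected_tags limit
instance (forms : List (List (String × List String))) (selected_tags : List String) (limit : Int) (out : List (List (String × List String))) : Decidable (Spec_filter_forms forms selected_tags limit out) := by unfold Spec_filter_forms; infer_instance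

-- ===== CLAIM (what is proved, stated in full; the proofs are below) =====
def Claim_equal_filter_forms : Prop := ∀ (forms : List (List (String × List String))) (selected_tags : List String) (limit : Int), Dom_filter_forms forms selected_tags limit → Spec_filter_forms forms selected_tags limit (filter_forms forms selected_tags limit)

-- ===== LEMMAS AND PROOFS =====

theorem insertBy_cons_eq {α : Type} (before : α → α → Bool) (x y : α) (ys : List α) :
    PySem.List.insertBy before x (y :: ys)
      = if before x y then x :: y :: ys else y :: PySem.List.insertBy before x ys := by
  by_cases h : before x y <;> simp [PySem.List.insertBy, h]

theorem insertBy_skip {α : Type} (before : α → α → Bool) (x : α) (as bs : List α)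
    (h : ∀ y ∈ as, before x y = false) :
    PySem.List.insertBy before x (as ++ bs) = as ++ PySem.List.insertBy before x bs := by
  induction as with
  | nil => rfl
  | cons a as ih =>
    rw [List.cons_append, insertBy_cons_eq, h a (by simp), if_neg (by simp)]
    rw [ih (fun y hy => h y (by simp [hy]))]
    simp

theorem insertBy_all {α : Type} (before : α → α → Bool) (x : α) (bs : List α)
    (h : ∀ y ∈ bs, before x y = true) :
    PySem.List.insertBy before x bs = x :: bs := by
  cases bs with
  | nil => rfl
  | cons b bs => rw [insertBy_cons_eq, if_pos (h b (by simp))]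

theorem insertBy_buckets {α : Type} (S : List Int) (hS : S.Pairwise (· > ·))
    (g : Int → List (Int × α)) (hg : ∀ s ∈ S, ∀ p ∈ g s, p.1 = s)
    (x : Int × α) (hx : x.1 ∈ S) :
    PySem.List.insertBy (fun a b => decide ((b : Int × α).1 < a.1)) x (S.flatMap g)
      = S.flatMap (fun s => g s ++ if s = x.1 then [x] else []) := by
  induction S with
  | nil => simp at hx
  | cons s S' ih =>
    have hgt : ∀ t ∈ S', s > t := (List.pairwise_cons.mp hS).1
    have hgs : ∀ p ∈ g s, p.1 = s := hg s (by simp)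
    by_cases hsk : s = x.1
    · -- x's own bucket: skip it, then x goes before everything after
      rw [List.flatMap_cons,
        insertBy_skip _ _ _ _ (fun y hy => by
          simp only [decide_eq_false_iff_not, not_lt]
          rw [hgs y hy, hsk]),
        insertBy_all _ _ _ (fun y hy => by
          obtain ⟨s', hs', hy'⟩ := List.mem_flatMap.mp hy
          have := hg s' (by simp [hs']) y hy'
          simp only [decide_eq_true_eq]
          rw [this, ← hsk]; exact hgt s' hs')]
      rw [List.flatMap_cons, if_pos hsk]
      have : S'.flatMap (fun s' => g s' ++ if s' = x.1 then [x] else []) = S'.flatMap g := by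
        apply List.flatMap_congr
        intro s' hs'
        rw [if_neg (by rw [← hsk]; exact ne_of_lt (hgt s' hs')), List.append_nil]
      rw [this]
      simp
    · -- not x's bucket: skip it and recurse
      have hx' : x.1 ∈ S' := by
        cases List.mem_cons.mp hx with
        | inl h => exact absurd h.symm hsk
        | inr h => exact h
      have hlt : x.1 < s := hgt _ hx'
      rw [List.flatMap_cons,
        insertBy_skip _ _ _ _ (fun y hy => by
          simp only [decide_eq_false_iff_not, not_lt]
          rw [hgs y hy]; exact le_of_lt hlt),
        ih (List.pairwise_cons.mp hS).2 (fun s' hs' => hg s' (by simp [hs'])) hx']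
      rw [List.flatMap_cons, if_neg hsk, List.append_nil]

theorem sorted_rev_fst_eq_buckets {α : Type} (S : List Int) (hS : S.Pairwise (· > ·))
    (xs : List (Int × α)) (hxs : ∀ p ∈ xs, p.1 ∈ S) :
    PySem.List.sorted xs (fun p => p.1) true
      = S.flatMap (fun s => xs.filter (fun p => p.1 == s)) := by
  induction xs using List.reverseRecOn with
  | nil => simp [PySem.List.sorted]
  | append_singleton xs x ih =>
    rw [PySem.List.sorted_rev_eq_foldl_insertBy, List.foldl_append, List.foldl_cons, List.foldl_nil,
      ← PySem.List.sorted_rev_eq_foldl_insertBy,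
      ih (fun p hp => hxs p (by simp [hp])),
      insertBy_buckets S hS _ (fun s _ p hp => by
        have := (List.mem_filter.mp hp).2; simpa using this)
        x (hxs x (by simp))]
    apply List.flatMap_congr
    intro s hs
    rw [List.filter_append]
    congr 1
    rcases eq_or_ne x.1 s with h | h
    · rw [if_pos h.symm, List.filter_singleton, beq_iff_eq.mpr h]; rfl
    · rw [if_neg (fun hh => h hh.symm), List.filter_singleton,
        show (x.1 == s) = false from by simp [h]]; rfl

-- a score is the count of matching tags, hence between 0 and the number of selected tags
theorem score_bounds (tags : List String) (form_tags : List String) :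
    0 ≤ tags.foldl (fun (n : Int) t => if t ∈ form_tags then n + 1 else n) 0 ∧
    tags.foldl (fun (n : Int) t => if t ∈ form_tags then n + 1 else n) 0 ≤ (tags.length : Int) := by
  rw [PySem.List.foldl_ite_add_one]
  constructor
  · positivity
  · simp only [zero_add]
    exact_mod_cast List.countP_le_length

theorem zip_map_self {α β : Type} (g : α → β) (l : List α) :
    l.zip (l.map g) = l.map (fun x => (x, g x)) := by
  induction l with
  | nil => rfl
  | cons x xs ih => simp [List.zip] at ih; simp [List.zip, ih]

theorem slice_to_map {α β : Type} (f : α → β) (xs : List α) (b : Int) :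
    PySem.List.slice (xs.map f) none (some b) = (PySem.List.slice xs none (some b)).map f := by
  simp [PySem.List.slice, PySem.List.clampIdx, List.map_take]

-- the whole non-empty-tags branch: sort-then-slice equals staged descending passes then slice
theorem sortSlice_eq_stagedSlice {α : Type} [DecidableEq α] (key : α → Int) (n : Nat)
    (hub : ∀ f : α, key f ≤ (n : Int)) (forms : List α) (limit : Int) :
    (PySem.List.slice
        (PySem.List.sorted
          (forms.foldl (fun acc form =>
            if key form > 0 then acc ++ [(key form, form)] else acc) ([] : List (Int × α)))
          (fun x => x.1) true)
        none (some limit)).map (fun p => p.2)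
      = PySem.List.slice
          ((PySem.List.pyRange (n : Int) 0 (-1)).foldl (fun acc s =>
            (forms.zip (forms.map key)).foldl (fun acc p =>
              if p.2 = s then acc ++ [p.1] else acc) acc) [])
          none (some limit) := by
  have hA : forms.foldl (fun acc form =>
      if key form > 0 then acc ++ [(key form, form)] else acc) ([] : List (Int × α))
      = (forms.filter (fun f => decide (key f > 0))).map (fun f => (key f, f)) := by
    rw [PySem.List.foldl_append_ite (p := fun f => key f > 0) (f := fun f => (key f, f))]
    simp
  set scored := (forms.filter (fun f => decide (key f > 0))).map (fun f => (key f, f))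
    with hscored
  set S := PySem.List.pyRange (n : Int) 0 (-1) with hSdef
  have hS : S.Pairwise (· > ·) := by
    rw [hSdef, PySem.List.pyRange_neg_one]
    exact List.Pairwise.map _ (fun a b (hab : a < b) => by omega) List.pairwise_lt_range
  have hmem : ∀ p ∈ scored, p.1 ∈ S := by
    intro p hp
    rw [hscored] at hp
    obtain ⟨f, hf, rfl⟩ := List.mem_map.mp hp
    have h1 : key f > 0 := by simpa using (List.mem_filter.mp hf).2
    rw [hSdef, PySem.List.mem_pyRange_neg_one]
    exact ⟨h1, hub f⟩
  have hzip := zip_map_self key forms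
  have hInner : (fun (acc : List α) (s : Int) => (forms.zip (forms.map key)).foldl
      (fun acc p => if p.2 = s then acc ++ [p.1] else acc) acc)
      = fun acc s => acc ++ forms.filter (fun f => decide (key f = s)) := by
    funext acc s
    rw [hzip, List.foldl_map]
    exact PySem.List.foldl_append_ite_eq_filter (p := fun f => key f = s) forms acc
  rw [hA, sorted_rev_fst_eq_buckets S hS scored hmem, ← slice_to_map, List.map_flatMap,
    hInner, PySem.List.foldl_append_eq_flatMap, List.nil_append]
  congr 1
  apply List.flatMap_congr
  intro s hs
  have hs1 : 0 < s := (PySem.List.mem_pyRange_neg_one.mp (hSdef ▸ hs)).1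
  rw [hscored, List.filter_map, List.map_map]
  have : (fun f => (fun (p : Int × α) => p.1 == s) ((fun f => (key f, f)) f))
      = fun f => (key f == s) := rfl
  rw [show ((fun (p : Int × α) => p.1 == s) ∘ (fun f => (key f, f))) = fun f => (key f == s)
      from rfl]
  rw [List.filter_filter]
  have hpred : (fun f => (key f == s) && decide (key f > 0)) = fun f => decide (key f = s) := by
    funext f
    by_cases h : key f = s
    · simp [h]; omega
    · simp [h]
  rw [hpred]
  simp [Function.comp_def]

-- ===== VERDICT (by name: the statement is the Claim_ definition above) =====
theorem filter_forms_spec : Claim_equal_filter_forms := by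
  intro forms selected_tags limit _
  unfold Spec_filter_forms filter_forms filter_forms_alt
  by_cases hst : selected_tags = []
  · simp [hst]
  · simp only [if_neg hst, PySem.List.len_eq, List.length_map]
    exact sortSlice_eq_stagedSlice
      (fun form => (selected_tags.map PySem.Str.lower).foldl
        (fun n t => if t ∈ ((PySem.Dict.mk form).getD "tags" []).map PySem.Str.lower
          then n + 1 else n) 0)
      selected_tags.length
      (fun f => by
        have := (score_bounds (selected_tags.map PySem.Str.lower)
          (((PySem.Dict.mk f).getD "tags" []).map PySem.Str.lower)).2
        simpa using this)
      forms limit
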